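-- pv_equiv track=rewrite | github.com/wilmurillo-ai/Design-Assistant | .skills/openclaw-skills/skills/rokami/docx-formatter/docx-formatter.py | convert_quotes
-- ===== SOURCE A (Python) =====
-- LEFT_QUOTE = '\u201c'   # "
--
-- RIGHT_QUOTE = '\u201d'  # "
--
-- def convert_quotes(text):
--     """将英文引号转换为中文引号（成对替换）"""
--     result = []
--     in_quote = False
--
--     for char in text:
--         if char == '"':
--             if in_quote:
--                 result.append(RIGHT_QUOTE)  # 右引号 "
--                 in_quote = False
--             else:
--                 result.append(LEFT_QUOTE)   # 左引号 "
--                 in_quote = True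
--         else:
--             result.append(char)
--
--     return ''.join(result)
-- ===== SOURCE B (Python) =====
-- LEFT_QUOTE = '\u201c'   # "
--
-- RIGHT_QUOTE = '\u201d'  # "
--
-- def convert_quotes(text):
--     """将英文引号转换为中文引号（成对替换）"""
--     segs = text.split('"')
--     parts = [segs[0]]
--     left = True
--     for seg in segs[1:]:
--         parts.append(LEFT_QUOTE if left else RIGHT_QUOTE)
--         parts.append(seg)
--         left = not left
--     return ''.join(parts)
-- ===== Notes on version B (the rewrite author's own statement) =====
-- stated objective: faster
-- what changed: B splits the text on the ASCII quote once and rejoins the segments, interleaving alternating Chinese quotes between them, instead of A's per-character loop with an in_quote toggle; the per-character Python loop is replaced by C-level str.split/str.join.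
import Mathlib
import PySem

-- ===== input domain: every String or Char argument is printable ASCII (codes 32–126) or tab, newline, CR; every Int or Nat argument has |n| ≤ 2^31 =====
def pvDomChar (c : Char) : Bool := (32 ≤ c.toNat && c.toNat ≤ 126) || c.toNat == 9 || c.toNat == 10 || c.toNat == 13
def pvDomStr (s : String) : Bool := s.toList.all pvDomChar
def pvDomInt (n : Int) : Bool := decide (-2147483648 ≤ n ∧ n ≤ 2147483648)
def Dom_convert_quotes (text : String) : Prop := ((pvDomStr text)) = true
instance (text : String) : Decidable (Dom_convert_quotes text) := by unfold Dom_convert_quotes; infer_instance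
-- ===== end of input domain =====

-- B rebuilds the string from text.split('"') with alternating Chinese quotes interleaved,
-- instead of A's per-character loop with an in_quote toggle. Return values proved equal on all inputs.

-- ===== PORT A =====
-- per-character foldl carrying (result, in_quote), then ''.join
def convert_quotes (text : String) : String :=
  let r := text.toList.foldl
    (fun (st : List (List Char) × Bool) c =>
      if c = '"' then
        if st.2 then (st.1 ++ [['”']], false)
        else (st.1 ++ [['“']], true)
      else (st.1 ++ [[c]], st.2))
    ([], false)
  String.mk (PySem.Chars.join [] r.1)

-- ===== PORT B =====
-- split on '"' (Python's str.split with a one-char separator = List.splitOn on the chars),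
-- then fold over the remaining segments carrying (parts, left), then ''.join
def convert_quotes_alt (text : String) : String :=
  let segs := text.toList.splitOn '"'
  let r := segs.tail.foldl
    (fun (st : List (List Char) × Bool) seg =>
      (st.1 ++ [if st.2 then ['“'] else ['”']] ++ [seg], !st.2))
    ([segs.headI], true)
  String.mk (PySem.Chars.join [] r.1)

-- ===== PRECONDITION & SPEC =====
def Spec_convert_quotes (text : String) (out : String) : Prop := out = convert_quotes_alt text
instance (text : String) (out : String) : Decidable (Spec_convert_quotes text out) := by unfold Spec_convert_quotes; infer_instance

-- ===== CLAIM (what is proved, stated in full; the proofs are below) =====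
def Claim_equal_convert_quotes : Prop := ∀ (text : String), Dom_convert_quotes text → Spec_convert_quotes text (convert_quotes text)

-- ===== LEMMAS AND PROOFS =====

-- reference spec: the character recursion with the in_quote flag
def pvConv : List Char → Bool → List Char
  | [], _ => []
  | c :: cs, b =>
    if c = '"' then (if b then '”' else '“') :: pvConv cs (!b)
    else c :: pvConv cs b

-- reference spec: segments interleaved with alternating quotes
def pvIleave (left : Bool) : List (List Char) → List Char
  | [] => []
  | s :: rest => (if left then '“' else '”') :: (s ++ pvIleave (!left) rest)

theorem pvJoinNil (l : List (List Char)) : PySem.Chars.join [] l = l.flatten := by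
  induction l with
  | nil => exact PySem.Chars.join_nil []
  | cons x xs ih =>
    cases xs with
    | nil => simp [PySem.Chars.join_singleton]
    | cons y ys => rw [PySem.Chars.join_cons_cons, ih]; simp

theorem pvALoop (cs : List Char) (acc : List (List Char)) (b : Bool) :
    (cs.foldl
      (fun (st : List (List Char) × Bool) c =>
        if c = '"' then
          if st.2 then (st.1 ++ [['”']], false)
          else (st.1 ++ [['“']], true)
        else (st.1 ++ [[c]], st.2)) (acc, b)).1.flatten
    = acc.flatten ++ pvConv cs b := by
  induction cs generalizing acc b with
  | nil => simp [pvConv]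
  | cons c cs ih =>
    by_cases hc : c = '"'
    · cases b <;> simp only [List.foldl_cons, hc, if_pos rfl, if_true, Bool.false_eq_true,
        if_false, ite_true, ite_false] <;> rw [ih] <;> simp [pvConv, hc]
    · simp [hc, pvConv, ih]

theorem pvBLoop (segs : List (List Char)) (acc : List (List Char)) (left : Bool) :
    (segs.foldl
      (fun (st : List (List Char) × Bool) seg =>
        (st.1 ++ [if st.2 then ['“'] else ['”']] ++ [seg], !st.2)) (acc, left)).1.flatten
    = acc.flatten ++ pvIleave left segs := by
  induction segs generalizing acc left with
  | nil => simp [pvIleave]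
  | cons s rest ih =>
    simp only [List.foldl_cons]
    rw [ih]
    cases left <;> simp [pvIleave]

theorem pvSplitNeNil (cs : List Char) : cs.splitOn '"' ≠ [] :=
  List.splitOnP_ne_nil _ cs

theorem pvConvSplit (cs : List Char) (b : Bool) :
    pvConv cs b = (cs.splitOn '"').headI ++ pvIleave (!b) (cs.splitOn '"').tail := by
  induction cs generalizing b with
  | nil => simp [pvConv, List.splitOn, pvIleave]
  | cons c cs ih =>
    rw [List.splitOn, List.splitOnP_cons]
    by_cases hc : c = '"'
    · have hne := pvSplitNeNil cs
      rw [List.splitOn] at hne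
      obtain ⟨s0, rest, hsr⟩ := List.exists_cons_of_ne_nil hne
      simp only [hc, beq_self_eq_true, if_true, List.headI, List.tail, pvConv, if_pos rfl]
      rw [ih]
      cases b <;> simp [List.splitOn, hsr, pvIleave]
    · have hne := pvSplitNeNil cs
      rw [List.splitOn] at hne
      obtain ⟨s0, rest, hsr⟩ := List.exists_cons_of_ne_nil hne
      simp only [beq_iff_eq, hc, if_false, hsr, List.modifyHead, List.headI, List.tail, ite_false]
      simp only [pvConv, hc, if_false, ite_false]
      rw [ih]
      simp [List.splitOn, hsr]

-- ===== VERDICT (by name: the statement is the Claim_ definition above) =====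
theorem convert_quotes_spec : Claim_equal_convert_quotes := by
  intro text _
  unfold Spec_convert_quotes convert_quotes convert_quotes_alt
  simp only
  rw [pvJoinNil, pvJoinNil, pvALoop, pvBLoop]
  have h := pvConvSplit text.toList false
  simp only [Bool.not_false] at h
  simp [h]
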